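-- pv_equiv track=rewrite | github.com/ACChaotic/TEUINGLAH | fungsiCSV.py | cariKolom
-- ===== SOURCE A (Python) =====
-- def cariKolom (x):
--     count = 1
--     for i in x:
--         if i == ";":
--             count +=1
--
--         if i == "\n":
--             break
--     return count
-- ===== SOURCE B (Python) =====
-- def cariKolom(x):
--     return x.partition("\n")[0].count(";") + 1
-- ===== Notes on version B (the rewrite author's own statement) =====
-- stated objective: simpler
-- what changed: Replaces the character-by-character loop with manual counter and early break by partitioning the string at the first newline and counting the separator in that prefix with str.count.
import Mathlib
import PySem

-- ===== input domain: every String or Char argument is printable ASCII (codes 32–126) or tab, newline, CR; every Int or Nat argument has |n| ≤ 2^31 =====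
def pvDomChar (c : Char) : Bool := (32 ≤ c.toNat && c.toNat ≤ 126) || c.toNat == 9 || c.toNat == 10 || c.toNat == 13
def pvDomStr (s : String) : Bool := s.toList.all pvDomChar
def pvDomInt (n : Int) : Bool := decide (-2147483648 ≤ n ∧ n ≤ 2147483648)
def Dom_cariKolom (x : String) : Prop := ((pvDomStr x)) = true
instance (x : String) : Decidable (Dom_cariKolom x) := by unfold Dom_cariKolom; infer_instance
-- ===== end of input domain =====

-- B computes the first line by partitioning at the first newline and counts ';' there, instead of A's
-- manual per-character loop with a counter and break; objective: simpler.

-- ===== PORT A =====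
-- A's loop: per-character, count ';', break on '\n'
def cariKolomLoop : List Char → Int → Int
  | [], count => count
  | i :: rest, count =>
    let count' := if i == ';' then count + 1 else count
    if i == '\n' then count' else cariKolomLoop rest count'

def cariKolom (x : String) : Int := cariKolomLoop x.toList 1

-- ===== PORT B =====
-- x.partition("\n")[0] is ported by hand as takeWhile (≠ '\n'): exact, the first component of partition
-- is the prefix before the first newline; .count(";") is a single-char count → List.count.
def cariKolom_alt (x : String) : Int :=
  let first := x.toList.takeWhile (fun c => c ≠ '\n')
  (first.count ';' : Int) + 1

-- ===== PRECONDITION & SPEC =====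
def Spec_cariKolom (x : String) (out : Int) : Prop := out = cariKolom_alt x
instance (x : String) (out : Int) : Decidable (Spec_cariKolom x out) := by unfold Spec_cariKolom; infer_instance

-- ===== CLAIM (what is proved, stated in full; the proofs are below) =====
def Claim_equal_cariKolom : Prop := ∀ (x : String), Dom_cariKolom x → Spec_cariKolom x (cariKolom x)

-- ===== LEMMAS AND PROOFS =====
theorem cariKolomLoop_eq (l : List Char) (c : Int) :
    cariKolomLoop l c = c + ((l.takeWhile (fun ch => ch ≠ '\n')).count ';' : Int) := by
  induction l generalizing c with
  | nil => simp [cariKolomLoop]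
  | cons i rest ih =>
    by_cases hnl : i = '\n'
    · subst hnl
      simp [cariKolomLoop, List.takeWhile]
    · simp only [cariKolomLoop, List.takeWhile, ih]
      by_cases hs : i = ';' <;> simp [hs, hnl] <;> ring

-- ===== VERDICT (by name: the statement is the Claim_ definition above) =====
theorem cariKolom_spec : Claim_equal_cariKolom := by
  intro x _
  unfold Spec_cariKolom cariKolom cariKolom_alt
  rw [cariKolomLoop_eq]
  ring
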